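-- pv_equiv track=rewrite | github.com/taktaktak326/streamlit_hojou_app | streamlit_xarvio_ndvi_lai.py | is_target_magnitude
-- ===== SOURCE A (Python) =====
-- def normalize_magnitude_type(mt: str) -> str:
--     mt = mt.strip().upper()
--     alias_map = {
--         "AVERAGE_NDVI": "NDVI",
--     }
--     return alias_map.get(mt, mt)
--
-- def is_target_magnitude(magnitude_type: str, target_set: set[str]) -> bool:
--     mt_raw = magnitude_type.strip().upper()
--     if not mt_raw:
--         return False
--     mt = normalize_magnitude_type(mt_raw)
--     normalized_targets = {normalize_magnitude_type(t) for t in target_set}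
--     if mt in normalized_targets:
--         return True
--     return any(mt.startswith(t + "_") for t in normalized_targets)
-- ===== SOURCE B (Python) =====
-- def normalize_magnitude_type(mt: str) -> str:
--     mt = mt.strip().upper()
--     alias_map = {
--         "AVERAGE_NDVI": "NDVI",
--     }
--     return alias_map.get(mt, mt)
--
-- def is_target_magnitude(magnitude_type: str, target_set: set[str]) -> bool:
--     # Instead of scanning every target with startswith, generate the input's
--     # underscore-boundary prefixes and look each one up in the target set.
--     mt_raw = magnitude_type.strip().upper()
--     if not mt_raw:
--         return False
--     mt = normalize_magnitude_type(mt_raw)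
--     normalized_targets = {normalize_magnitude_type(t) for t in target_set}
--     parts = mt.split('_')
--     return any('_'.join(parts[:k]) in normalized_targets
--                for k in range(1, len(parts) + 1))
-- ===== Notes on version B (the rewrite author's own statement) =====
-- stated objective: alternative
-- what changed: Replaced the scan over all targets with startswith(t+'_') by generating the input's underscore-boundary prefixes ('_'.join(parts[:k]) for k=1..len(parts)) and testing each for membership in the normalized target set, the k=len(parts) case subsuming the exact-match branch.
import Mathlib
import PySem

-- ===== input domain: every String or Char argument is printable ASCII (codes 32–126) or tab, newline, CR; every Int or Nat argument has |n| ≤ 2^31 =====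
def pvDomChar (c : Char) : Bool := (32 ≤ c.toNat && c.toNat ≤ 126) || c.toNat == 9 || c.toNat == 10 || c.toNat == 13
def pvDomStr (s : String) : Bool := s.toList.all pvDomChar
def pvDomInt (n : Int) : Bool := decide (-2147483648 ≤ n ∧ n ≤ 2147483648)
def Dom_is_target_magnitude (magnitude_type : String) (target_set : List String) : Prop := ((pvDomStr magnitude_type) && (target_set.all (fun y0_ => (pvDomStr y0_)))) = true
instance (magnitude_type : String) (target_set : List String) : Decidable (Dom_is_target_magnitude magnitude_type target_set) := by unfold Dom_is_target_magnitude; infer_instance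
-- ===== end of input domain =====

-- B replaces A's scan over all targets with startswith(t+"_") by testing the input's
-- underscore-boundary prefixes for membership in the normalized target set (alternative decomposition).

-- ===== PORT A =====
-- shared module helper (defined identically in Source A and Source B)
def normalize_magnitude_type (mt : String) : String :=
  let mt' := PySem.Str.upper (PySem.Str.strip mt)
  let alias_map : PySem.Dict String String := PySem.Dict.ofList [("AVERAGE_NDVI", "NDVI")]
  PySem.Dict.getD alias_map mt' mt'

def is_target_magnitude (magnitude_type : String) (target_set : List String) : Bool :=
  let mt_raw := PySem.Str.upper (PySem.Str.strip magnitude_type)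
  if mt_raw = "" then false
  else
    let mt := normalize_magnitude_type mt_raw
    let normalized_targets : PySem.Set String :=
      PySem.Set.ofList (target_set.map (fun t => normalize_magnitude_type t))
    if normalized_targets.contains mt then true
    else normalized_targets.any (fun t => PySem.Str.startswith mt (t ++ "_"))

-- ===== PORT B =====
def is_target_magnitude_alt (magnitude_type : String) (target_set : List String) : Bool :=
  let mt_raw := PySem.Str.upper (PySem.Str.strip magnitude_type)
  if mt_raw = "" then false
  else
    let mt := normalize_magnitude_type mt_raw
    let normalized_targets : PySem.Set String :=
      PySem.Set.ofList (target_set.map (fun t => normalize_magnitude_type t))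
    -- mt.split('_'): the separator "_" is a nonempty literal, so split? is always `some`
    let parts := (PySem.Str.split? mt "_").getD []
    (PySem.List.pyRange 1 (parts.length + 1)).any (fun k =>
      normalized_targets.contains (PySem.Str.join "_" (PySem.List.slice parts none (some k))))

-- ===== PRECONDITION & SPEC =====
def Spec_is_target_magnitude (magnitude_type : String) (target_set : List String) (out : Bool) : Prop := out = is_target_magnitude_alt magnitude_type target_set
instance (magnitude_type : String) (target_set : List String) (out : Bool) : Decidable (Spec_is_target_magnitude magnitude_type target_set out) := by unfold Spec_is_target_magnitude; infer_instance

-- ===== CLAIM (what is proved, stated in full; the proofs are below) =====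
def Claim_equal_is_target_magnitude : Prop := ∀ (magnitude_type : String) (target_set : List String), Dom_is_target_magnitude magnitude_type target_set → Spec_is_target_magnitude magnitude_type target_set (is_target_magnitude magnitude_type target_set)

-- ===== LEMMAS AND PROOFS =====

-- A simple structural recursion equal to PySem.Chars.splitOn on the separator ['_'].
def pvSplit : List Char → List Char → List (List Char)
  | cur, [] => [cur.reverse]
  | cur, c :: rest => if c = '_' then cur.reverse :: pvSplit [] rest else pvSplit (c :: cur) rest

lemma pv_inter_cons (a b : List Char) (ts : List (List Char)) :
    ['_'].intercalate (a :: b :: ts) = a ++ '_' :: ['_'].intercalate (b :: ts) := by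
  simp [List.intercalate, List.intersperse]

lemma pv_inter_single (a : List Char) : ['_'].intercalate [a] = a := by
  simp [List.intercalate]

lemma pvSplit_go (l : List Char) : ∀ (fuel : Nat) (cur : List Char) (acc : List (List Char)),
    l.length < fuel →
    PySem.Chars.splitOn.go ['_'] fuel l cur acc = acc.reverse ++ pvSplit cur l := by
  induction l with
  | nil =>
    intro fuel cur acc h
    match fuel with
    | f + 1 => rw [PySem.Chars.splitOn.go.eq_def]; simp [pvSplit]
  | cons c rest ih =>
    intro fuel cur acc h
    match fuel with
    | f + 1 =>
      rw [PySem.Chars.splitOn.go.eq_def]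
      dsimp only
      by_cases hc : c = '_'
      · subst hc
        rw [if_pos (by rw [List.isPrefixOf_iff_prefix]; exact ⟨rest, rfl⟩)]
        simp only [List.length_singleton, List.drop_succ_cons, List.drop_zero]
        rw [ih f [] (cur.reverse :: acc) (by simp at h; omega)]
        rw [pvSplit, if_pos rfl]
        simp
      · rw [if_neg (by rw [List.isPrefixOf_iff_prefix]; simp [List.cons_prefix_cons, eq_comm, hc])]
        rw [ih f (c :: cur) acc (by simp at h; omega)]
        rw [pvSplit, if_neg hc]

lemma splitOn_eq_pvSplit (s : List Char) :
    PySem.Chars.splitOn s ['_'] = pvSplit [] s := by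
  unfold PySem.Chars.splitOn
  rw [pvSplit_go s (s.length + 1) [] [] (by omega)]
  simp

lemma pvSplit_ne_nil (l cur : List Char) : pvSplit cur l ≠ [] := by
  induction l generalizing cur with
  | nil => simp [pvSplit]
  | cons c rest ih => by_cases hc : c = '_' <;> simp [pvSplit, hc, ih]

lemma pvSplit_intercalate (l : List Char) : ∀ cur,
    ['_'].intercalate (pvSplit cur l) = cur.reverse ++ l := by
  induction l with
  | nil => intro cur; rw [pvSplit, pv_inter_single]; simp
  | cons c rest ih =>
    intro cur
    by_cases hc : c = '_'
    · subst hc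
      rw [pvSplit, if_pos rfl]
      obtain ⟨p, ts, hpts⟩ := List.exists_cons_of_ne_nil (pvSplit_ne_nil rest [])
      rw [hpts, pv_inter_cons, ← hpts, ih]
      simp
    · rw [pvSplit, if_neg hc, ih (c :: cur)]
      simp

lemma pvSplit_no_sep (l : List Char) : ∀ cur, '_' ∉ cur →
    ∀ p ∈ pvSplit cur l, '_' ∉ p := by
  induction l with
  | nil =>
    intro cur hcur p hp
    rw [pvSplit] at hp
    simp only [List.mem_singleton] at hp
    subst hp; simpa using hcur
  | cons c rest ih =>
    intro cur hcur p hp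
    by_cases hc : c = '_'
    · subst hc
      rw [pvSplit, if_pos rfl] at hp
      rcases List.mem_cons.mp hp with hp | hp
      · subst hp; simpa using hcur
      · exact ih [] (by simp) p hp
    · rw [pvSplit, if_neg hc] at hp
      exact ih (c :: cur) (by simp [hcur, Ne.symm hc]) p hp

-- prefix decomposition at an underscore boundary
lemma pv_pref_decomp (q : List Char) : ∀ (x cs' : List Char), '_' ∉ q →
    (x ++ ['_'] <+: q ++ '_' :: cs' ↔ x = q ∨ ∃ y, x = q ++ '_' :: y ∧ y ++ ['_'] <+: cs') := by
  induction q with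
  | nil =>
    intro x cs' _
    constructor
    · intro h
      match x with
      | [] => exact Or.inl rfl
      | c :: x' =>
        simp only [List.cons_append, List.nil_append, List.cons_prefix_cons] at h
        exact Or.inr ⟨x', by simp [h.1], h.2⟩
    · rintro (rfl | ⟨y, rfl, hy⟩)
      · simp
      · simpa using hy
  | cons a q' ih =>
    intro x cs' hq
    have ha : a ≠ '_' := fun h => hq (by simp [h])
    have hq' : '_' ∉ q' := fun h => hq (by simp [h])
    constructor
    · intro h
      match x with
      | [] =>
        simp only [List.nil_append, List.cons_append, List.cons_prefix_cons] at h
        exact absurd h.1.symm ha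
      | c :: x' =>
        simp only [List.cons_append, List.cons_prefix_cons] at h
        rcases (ih x' cs' hq').mp h.2 with rfl | ⟨y, rfl, hy⟩
        · exact Or.inl (by simp [h.1])
        · exact Or.inr ⟨y, by simp [h.1], hy⟩
    · rintro (rfl | ⟨y, rfl, hy⟩)
      · exact ⟨cs', by simp⟩
      · obtain ⟨t, rfl⟩ := hy
        exact ⟨t, by simp⟩

-- the values '_'.join(parts[:k]) for 1 ≤ k ≤ len(parts) are exactly: the whole string,
-- and the pieces of it that end right before an underscore
lemma pvKey : ∀ (ps : List (List Char)), ps ≠ [] → (∀ p ∈ ps, '_' ∉ p) → ∀ (x : List Char),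
    ((∃ k : Nat, 1 ≤ k ∧ k ≤ ps.length ∧ ['_'].intercalate (ps.take k) = x) ↔
      (x = ['_'].intercalate ps ∨ x ++ ['_'] <+: ['_'].intercalate ps)) := by
  intro ps
  induction ps with
  | nil => intro h; exact absurd rfl h
  | cons q ps' ih =>
    intro _ hno x
    have hq : '_' ∉ q := hno q (by simp)
    cases ps' with
    | nil =>
      constructor
      · rintro ⟨k, hk1, hk2, hx⟩
        have hk2' : k ≤ 1 := by simpa using hk2
        have : k = 1 := by omega
        subst this
        left
        rw [← hx]
        simp
      · rintro (rfl | h)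
        · refine ⟨1, le_refl 1, by simp, ?_⟩
          rw [show (1:Nat) = 0 + 1 from rfl, List.take_succ_cons, List.take_zero,
            pv_inter_single]
        · rw [pv_inter_single] at h
          exact absurd (h.sublist.subset (by simp)) hq
    | cons p ps'' =>
      have hno' : ∀ r ∈ p :: ps'', '_' ∉ r := fun r hr => hno r (by simp [hr])
      have hIH := ih (by simp) hno'
      rw [pv_inter_cons]
      constructor
      · rintro ⟨k, hk1, hk2, hx⟩
        match k, hk1 with
        | 1, _ =>
          right
          rw [show List.take 1 (q :: p :: ps'') = [q] by simp, pv_inter_single] at hx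
          subst hx
          exact (pv_pref_decomp q _ _ hq).mpr (Or.inl rfl)
        | (k'' + 2), _ =>
          have hk2' : k'' + 1 ≤ (p :: ps'').length := by
            simp only [List.length_cons] at hk2 ⊢
            omega
          rw [List.take_succ_cons, List.take_succ_cons, pv_inter_cons] at hx
          rw [← List.take_succ_cons] at hx
          rcases (hIH (['_'].intercalate (List.take (k'' + 1) (p :: ps'')))).mp
            ⟨k'' + 1, by omega, hk2', rfl⟩ with heq | hpre
          · left; rw [← hx, heq]
          · right
            rw [← hx]
            exact (pv_pref_decomp q _ _ hq).mpr (Or.inr ⟨_, rfl, hpre⟩)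
      · intro h
        rcases h with hx | hpre
        · refine ⟨(q :: p :: ps'').length, by simp, le_refl _, ?_⟩
          rw [List.take_length, pv_inter_cons, hx]
        · rcases (pv_pref_decomp q x _ hq).mp hpre with rfl | ⟨y, rfl, hy⟩
          · refine ⟨1, le_refl 1, by simp, ?_⟩
            rw [show (1:Nat) = 0 + 1 from rfl, List.take_succ_cons, List.take_zero, pv_inter_single]
          · rcases (hIH y).mpr (Or.inr hy) with ⟨k', hk1', hk2', hy'⟩
            obtain ⟨k'', rfl⟩ : ∃ k'', k' = k'' + 1 := ⟨k' - 1, by omega⟩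
            refine ⟨k'' + 2, by omega, by simpa using hk2', ?_⟩
            rw [List.take_succ_cons, List.take_succ_cons, pv_inter_cons, ← List.take_succ_cons, hy']

-- toList of the join, used twice above
lemma pv_join_toList (l : List (List Char)) :
    (PySem.Str.join "_" (l.map String.ofList)).toList = ['_'].intercalate l := by
  rw [PySem.Str.toList_join]
  simp only [List.map_map]
  have : (String.toList ∘ String.ofList) = id := by
    funext c; simp [Function.comp]
  rw [this, List.map_id]
  rfl

-- the heart of the equivalence, stated over the shared normalized data
lemma pv_main (mt : String) (T : List String) :
    (if PySem.Set.contains T mt = true then true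
     else T.any (fun t => PySem.Str.startswith mt (t ++ "_")))
    = (PySem.List.pyRange 1 ((((PySem.Str.split? mt "_").getD []).length : Int) + 1)).any (fun k =>
        PySem.Set.contains T (PySem.Str.join "_"
          (PySem.List.slice ((PySem.Str.split? mt "_").getD []) none (some k)))) := by
  have hsplit : PySem.Str.split? mt "_" = some ((pvSplit [] mt.toList).map String.ofList) := by
    simp [PySem.Str.split?, PySem.Chars.split?, splitOn_eq_pvSplit]
  set ps := pvSplit [] mt.toList with hps
  have hinter : ['_'].intercalate ps = mt.toList := by
    simpa using pvSplit_intercalate mt.toList []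
  have hne : ps ≠ [] := pvSplit_ne_nil mt.toList []
  have hno : ∀ p ∈ ps, '_' ∉ p := pvSplit_no_sep mt.toList [] (by simp)
  rw [hsplit]
  rw [Bool.eq_iff_iff]
  constructor
  · intro h
    -- A says: mt ∈ T, or some t ∈ T with t ++ "_" a prefix of mt
    have h' : ∃ t ∈ T, t.toList = ['_'].intercalate ps ∨ t.toList ++ ['_'] <+: ['_'].intercalate ps := by
      rw [hinter]
      split_ifs at h with hc
      · exact ⟨mt, by simpa [PySem.Set.contains, List.contains_iff_mem] using hc, Or.inl rfl⟩
      · obtain ⟨t, ht, hst⟩ := List.any_eq_true.mp h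
        refine ⟨t, ht, Or.inr ?_⟩
        rw [PySem.Str.startswith_eq] at hst
        have := (PySem.Chars.startswith_iff _ _).mp hst
        simpa [String.toList_append] using this
    obtain ⟨t, ht, hDis⟩ := h'
    obtain ⟨k, hk1, hk2, hk3⟩ := (pvKey ps hne hno t.toList).mpr hDis
    rw [List.any_eq_true]
    refine ⟨(k : Int), PySem.List.mem_pyRange_one.mpr
      ⟨by exact_mod_cast hk1, by simp only [Option.getD_some, List.length_map]; omega⟩, ?_⟩
    rw [Option.getD_some, PySem.List.slice_to _ (Int.natCast_nonneg k), Int.toNat_natCast,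
      ← List.map_take]
    have hjoin : PySem.Str.join "_" (List.map String.ofList (List.take k ps)) = t := by
      rw [← String.toList_inj, pv_join_toList, hk3]
    rw [hjoin]
    simpa [PySem.Set.contains, List.contains_iff_mem] using ht
  · intro h
    obtain ⟨k, hk, hc⟩ := List.any_eq_true.mp h
    have hk' := PySem.List.mem_pyRange_one.mp hk
    simp only [Option.getD_some, List.length_map] at hk'
    rw [Option.getD_some, PySem.List.slice_to _ (by omega), ← List.map_take] at hc
    set t := PySem.Str.join "_" ((ps.take k.toNat).map String.ofList) with hT
    have ht : t ∈ T := by simpa [PySem.Set.contains, List.contains_iff_mem] using hc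
    have htl : t.toList = ['_'].intercalate (ps.take k.toNat) := by
      rw [hT, pv_join_toList]
    have hmem := (pvKey ps hne hno t.toList).mp
      ⟨k.toNat, by omega, by omega, htl.symm⟩
    rw [hinter] at hmem
    rcases hmem with heq | hpre
    · rw [if_pos]
      simp [PySem.Set.contains]
      rwa [show t = mt from String.toList_inj.mp heq] at ht
    · split_ifs with hc2
      · rfl
      · rw [List.any_eq_true]
        refine ⟨t, ht, ?_⟩
        rw [PySem.Str.startswith_eq]
        apply (PySem.Chars.startswith_iff _ _).mpr
        simpa [String.toList_append] using hpre

-- ===== VERDICT (by name: the statement is the Claim_ definition above) =====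
theorem is_target_magnitude_spec : Claim_equal_is_target_magnitude := by
  intro m ts _
  unfold Spec_is_target_magnitude is_target_magnitude is_target_magnitude_alt
  by_cases h : PySem.Str.upper (PySem.Str.strip m) = ""
  · simp only [h, if_true]
  · simp only [if_neg h]
    exact pv_main _ _
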